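-- pv_equiv track=rewrite | github.com/yuanliueur/LSH-HD- | Functions.py | true_duplicate_extraction
-- ===== SOURCE A (Python) =====
-- def true_duplicate_extraction(modelIDdictionary):
--     true_duplicate_pairs = set()
--     non_duplicate_pairs = set()
--
--     for key1, value1 in modelIDdictionary.items():
--         for key2, value2 in modelIDdictionary.items():
--             if value1 == value2 and key1 != key2:
--                 true_duplicate = [key1, key2]
--                 true_duplicate_pairs.add(tuple(sorted(true_duplicate)))
--             else:
--                 not_duplicate = [key1, key2]
--                 non_duplicate_pairs.add(tuple(sorted(not_duplicate)))
--     return true_duplicate_pairs, non_duplicate_pairs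
-- ===== SOURCE B (Python) =====
-- def true_duplicate_extraction(modelIDdictionary):
--     # One pass over unordered index pairs (upper triangle) instead of the full
--     # n x n grid with set-deduplication: dict keys are unique, so each sorted
--     # pair arises exactly once and no membership checks are needed.
--     items = list(modelIDdictionary.items())
--     dups = []
--     nondups = []
--     for i, (k1, v1) in enumerate(items):
--         nondups.append((k1, k1))
--         for k2, v2 in items[i + 1:]:
--             pair = (k1, k2) if k1 <= k2 else (k2, k1)
--             if v1 == v2:
--                 dups.append(pair)
--             else:
--                 nondups.append(pair)
--     return set(dups), set(nondups)
-- ===== Notes on version B (the rewrite author's own statement) =====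
-- stated objective: faster
-- what changed: B scans each unordered key pair once (upper triangle over the items) and partitions pairs directly into two lists, instead of A's full n*n double loop that re-derives every pair twice and deduplicates through set insertion.
import Mathlib
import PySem

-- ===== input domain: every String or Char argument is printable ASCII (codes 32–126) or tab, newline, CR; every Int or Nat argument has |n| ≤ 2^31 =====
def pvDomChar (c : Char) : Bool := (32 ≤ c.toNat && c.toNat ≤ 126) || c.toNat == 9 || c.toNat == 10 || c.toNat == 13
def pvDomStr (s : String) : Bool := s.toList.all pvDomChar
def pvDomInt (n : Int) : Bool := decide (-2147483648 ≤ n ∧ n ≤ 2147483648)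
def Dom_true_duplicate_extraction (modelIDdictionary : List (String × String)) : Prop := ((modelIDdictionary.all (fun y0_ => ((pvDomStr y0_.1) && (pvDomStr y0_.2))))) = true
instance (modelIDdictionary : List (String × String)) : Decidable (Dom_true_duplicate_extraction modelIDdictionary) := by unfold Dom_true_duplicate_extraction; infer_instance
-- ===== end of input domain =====

-- B replaces A's full n×n double loop with set-deduplication by a single scan of the
-- upper triangle of unordered key pairs, partitioning each pair once (objective: faster by a constant factor).


-- ===== PORT A =====
-- tuple(sorted([key1, key2])): Python's sorted on a two-element string list
-- (Lean's String ≤ is code-point lexicographic, as Python's str comparison).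
def tdeSorted2 (a b : String) : String × String := if a ≤ b then (a, b) else (b, a)

-- body of A's inner loop: classify the (key1,key2) pair and add it to the right set
def tdeInner (p1 : String × String)
    (acc : PySem.Set (String × String) × PySem.Set (String × String))
    (p2 : String × String) :
    PySem.Set (String × String) × PySem.Set (String × String) :=
  if p1.2 = p2.2 ∧ p1.1 ≠ p2.1 then
    (PySem.Set.add acc.1 (tdeSorted2 p1.1 p2.1), acc.2)
  else
    (acc.1, PySem.Set.add acc.2 (tdeSorted2 p1.1 p2.1))

-- for key1, value1 in d.items(): for key2, value2 in d.items(): …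
-- (d.items() is the association list itself; the two result sets start empty)
def true_duplicate_extraction (modelIDdictionary : List (String × String)) :
    (List (String × String)) × (List (String × String)) :=
  modelIDdictionary.foldl
    (fun acc p1 => modelIDdictionary.foldl (tdeInner p1) acc)
    (PySem.Set.empty, PySem.Set.empty)

-- ===== PORT B =====
-- inner loop of Source B: pair (k1,v1) with every later item, partitioned into (dups, nondups)
def tdeRow (k1 v1 : String) : List (String × String) →
    (List (String × String)) × (List (String × String))
  | [] => ([], [])
  | (k2, v2) :: rest =>
    let pr := tdeRow k1 v1 rest
    let pair := if k1 ≤ k2 then (k1, k2) else (k2, k1)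
    if v1 = v2 then (pair :: pr.1, pr.2) else (pr.1, pair :: pr.2)

-- outer loop of Source B: self pair into nondups, then the row over items[i+1:]
def tdeGo : List (String × String) →
    (List (String × String)) × (List (String × String))
  | [] => ([], [])
  | (k1, v1) :: rest =>
    let row := tdeRow k1 v1 rest
    let tl := tdeGo rest
    (row.1 ++ tl.1, (k1, k1) :: (row.2 ++ tl.2))

def true_duplicate_extraction_alt (modelIDdictionary : List (String × String)) :
    (List (String × String)) × (List (String × String)) :=
  let r := tdeGo modelIDdictionary
  -- return set(dups), set(nondups)
  (PySem.Set.ofList r.1, PySem.Set.ofList r.2)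

-- ===== PRECONDITION & SPEC =====
-- The association list models a Python dict, whose keys are necessarily distinct;
-- A is never called on a repeated key, so Pre_ excludes no input A's Python accepts.
def Pre_true_duplicate_extraction (modelIDdictionary : List (String × String)) : Prop :=
  (modelIDdictionary.map Prod.fst).Nodup
instance (modelIDdictionary : List (String × String)) : Decidable (Pre_true_duplicate_extraction modelIDdictionary) := by unfold Pre_true_duplicate_extraction; infer_instance

def pvWitness_true_duplicate_extraction : (List (String × String)) :=
  [("a", "x"), ("b", "x"), ("c", "y")]

def Spec_true_duplicate_extraction (modelIDdictionary : List (String × String)) (out : (List (String × String)) × (List (String × String))) : Prop := out = true_duplicate_extraction_alt modelIDdictionary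
instance (modelIDdictionary : List (String × String)) (out : (List (String × String)) × (List (String × String))) : Decidable (Spec_true_duplicate_extraction modelIDdictionary out) := by unfold Spec_true_duplicate_extraction; infer_instance

-- ===== CLAIM (what is proved, stated in full; the proofs are below) =====
def Claim_equal_true_duplicate_extraction : Prop := ∀ (modelIDdictionary : List (String × String)), Dom_true_duplicate_extraction modelIDdictionary → Pre_true_duplicate_extraction modelIDdictionary → Spec_true_duplicate_extraction modelIDdictionary (true_duplicate_extraction modelIDdictionary)

-- ===== LEMMAS AND PROOFS =====

theorem tdeSorted2_symm (a b : String) : tdeSorted2 a b = tdeSorted2 b a := by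
  unfold tdeSorted2
  split_ifs with h1 h2 h2 <;> try rfl
  · have h3 := String.toList_inj.mp
      (le_antisymm (String.le_iff_toList_le.mp h1) (String.le_iff_toList_le.mp h2))
    simp [h3]
  · rcases le_total a b with h | h <;> simp_all

theorem tdeSorted2_self (a : String) : tdeSorted2 a a = (a, a) := by
  simp [tdeSorted2]

theorem tdeSorted2_eq {a b c d : String} (h : tdeSorted2 a b = tdeSorted2 c d) :
    (a = c ∧ b = d) ∨ (a = d ∧ b = c) := by
  unfold tdeSorted2 at h
  split_ifs at h with h1 h2 h2 <;>
    simp only [Prod.mk.injEq] at h <;> tauto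

-- keys of pre and t are disjoint, and t's keys are duplicate-free
theorem tde_keys (pre t : List (String × String))
    (h : ((pre ++ t).map Prod.fst).Nodup) :
    (∀ q ∈ pre, ∀ p ∈ t, q.1 ≠ p.1) ∧ ((t.map Prod.fst).Nodup) := by
  rw [List.map_append, List.nodup_append] at h
  refine ⟨fun q hq p hp hqp => ?_, h.2.1⟩
  have h1 : q.1 ∈ pre.map Prod.fst := List.mem_map_of_mem hq
  have h2 : q.1 ∈ t.map Prod.fst := by rw [hqp]; exact List.mem_map_of_mem hp
  exact h.2.2 q.1 h1 q.1 h2 rfl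

-- a row's pass over already-processed items changes nothing: every pair is present
theorem tde_row_pre (p1 : String × String) :
    ∀ (l : List (String × String)) (D ND : List (String × String)),
      (∀ p2 ∈ l, ((p1.2 = p2.2 ∧ p1.1 ≠ p2.1) → tdeSorted2 p1.1 p2.1 ∈ D) ∧
                 (¬(p1.2 = p2.2 ∧ p1.1 ≠ p2.1) → tdeSorted2 p1.1 p2.1 ∈ ND)) →
      l.foldl (tdeInner p1) (D, ND) = (D, ND)
  | [], D, ND, _ => rfl
  | p2 :: l, D, ND, h => by
    have h2 := h p2 (by simp)
    have hrest : ∀ p ∈ l, _ := fun p hp => h p (by simp [hp])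
    by_cases hc : p1.2 = p2.2 ∧ p1.1 ≠ p2.1
    · simp only [List.foldl_cons, tdeInner, if_pos hc, PySem.Set.add_of_mem (h2.1 hc)]
      exact tde_row_pre p1 l D ND hrest
    · simp only [List.foldl_cons, tdeInner, if_neg hc, PySem.Set.add_of_mem (h2.2 hc)]
      exact tde_row_pre p1 l D ND hrest

theorem tdeRow_mem1 (k1 v1 : String) :
    ∀ (l : List (String × String)) (x : String × String),
      x ∈ (tdeRow k1 v1 l).1 ↔ ∃ p2 ∈ l, v1 = p2.2 ∧ x = tdeSorted2 k1 p2.1 := by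
  intro l
  induction l with
  | nil => simp [tdeRow]
  | cons p2 l ih =>
    obtain ⟨k2, v2⟩ := p2
    intro x
    by_cases hv : v1 = v2
    · subst hv
      simp [tdeRow, ih, tdeSorted2]
    · simp [tdeRow, hv, ih, tdeSorted2]

theorem tdeRow_mem2 (k1 v1 : String) :
    ∀ (l : List (String × String)) (x : String × String),
      x ∈ (tdeRow k1 v1 l).2 ↔ ∃ p2 ∈ l, v1 ≠ p2.2 ∧ x = tdeSorted2 k1 p2.1 := by
  intro l
  induction l with
  | nil => simp [tdeRow]
  | cons p2 l ih =>
    obtain ⟨k2, v2⟩ := p2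
    intro x
    by_cases hv : v1 = v2
    · subst hv
      simp [tdeRow, ih, tdeSorted2]
    · simp [tdeRow, hv, ih, tdeSorted2]

theorem tdeSorted2_toList (k1 k2 : String) :
    tdeSorted2 k1 k2 = if k1.toList ≤ k2.toList then (k1, k2) else (k2, k1) := by
  unfold tdeSorted2
  split_ifs with h1 h2 h2 <;> try rfl
  · exact absurd (String.le_iff_toList_le.mp h1) h2
  · exact absurd (String.le_iff_toList_le.mpr h2) h1

-- a row's pass over the not-yet-processed items appends exactly Source B's row
theorem tde_row_post (k1 v1 : String) :
    ∀ (l : List (String × String)) (D ND : List (String × String)),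
      (∀ p2 ∈ l, k1 ≠ p2.1) →
      (∀ p2 ∈ l, v1 = p2.2 → tdeSorted2 k1 p2.1 ∉ D) →
      (∀ p2 ∈ l, v1 ≠ p2.2 → tdeSorted2 k1 p2.1 ∉ ND) →
      ((l.map (fun p2 => tdeSorted2 k1 p2.1)).Nodup) →
      l.foldl (tdeInner (k1, v1)) (D, ND)
        = (D ++ (tdeRow k1 v1 l).1, ND ++ (tdeRow k1 v1 l).2)
  | [], D, ND, _, _, _, _ => by simp [tdeRow]
  | (k2, v2) :: l, D, ND, hk, hD, hND, hmap => by
    have hk12 : k1 ≠ k2 := hk (k2, v2) (by simp)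
    rw [List.foldl_cons]
    rw [List.map_cons, List.nodup_cons] at hmap
    by_cases hv : v1 = v2
    · have hcond : ((k1, v1) : String × String).2 = ((k2, v2) : String × String).2 ∧
          ((k1, v1) : String × String).1 ≠ ((k2, v2) : String × String).1 := ⟨hv, hk12⟩
      have hs : tdeInner (k1, v1) (D, ND) (k2, v2) = (D ++ [tdeSorted2 k1 k2], ND) := by
        simp only [tdeInner, if_pos hcond]
        rw [PySem.Set.add_of_not_mem (hD (k2, v2) (by simp) hv)]
      rw [hs]
      rw [tde_row_post k1 v1 l (D ++ [tdeSorted2 k1 k2]) ND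
        (fun p hp => hk p (by simp [hp]))
        (fun p hp hvp => by
          simp only [List.mem_append, List.mem_singleton]
          rintro (h | h)
          · exact hD p (by simp [hp]) hvp h
          · exact hmap.1 (h ▸ List.mem_map_of_mem hp))
        (fun p hp hvp => hND p (by simp [hp]) hvp)
        hmap.2]
      simp [tdeRow, hv]
      exact tdeSorted2_toList k1 k2
    · have hcond : ¬ (((k1, v1) : String × String).2 = ((k2, v2) : String × String).2 ∧
          ((k1, v1) : String × String).1 ≠ ((k2, v2) : String × String).1) := by
        simp only [ne_eq]
        intro h
        exact hv h.1
      have hs : tdeInner (k1, v1) (D, ND) (k2, v2) = (D, ND ++ [tdeSorted2 k1 k2]) := by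
        simp only [tdeInner, if_neg hcond]
        rw [PySem.Set.add_of_not_mem (hND (k2, v2) (by simp) hv)]
      rw [hs]
      rw [tde_row_post k1 v1 l D (ND ++ [tdeSorted2 k1 k2])
        (fun p hp => hk p (by simp [hp]))
        (fun p hp hvp => hD p (by simp [hp]) hvp)
        (fun p hp hvp => by
          simp only [List.mem_append, List.mem_singleton]
          rintro (h | h)
          · exact hND p (by simp [hp]) hvp h
          · exact hmap.1 (h ▸ List.mem_map_of_mem hp))
        hmap.2]
      simp [tdeRow, hv]
      exact tdeSorted2_toList k1 k2

theorem tde_cond_symm {q p : String × String} (h : q.2 = p.2 ∧ q.1 ≠ p.1) :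
    p.2 = q.2 ∧ p.1 ≠ q.1 := ⟨h.1.symm, fun e => h.2 e.symm⟩

theorem tde_ncond_symm {q p : String × String} (h : ¬(q.2 = p.2 ∧ q.1 ≠ p.1)) :
    ¬(p.2 = q.2 ∧ p.1 ≠ q.1) := fun hc => h ⟨hc.1.symm, fun e => hc.2 e.symm⟩

-- the invariant: after the rows of `pre`, the loop over `t` appends exactly Source B's rows
theorem tde_main (m : List (String × String)) (hnd : (m.map Prod.fst).Nodup) :
    ∀ (t pre D ND : List (String × String)),
      m = pre ++ t →
      (∀ x, x ∈ D ↔ ∃ q ∈ pre, ∃ p ∈ m, (q.2 = p.2 ∧ q.1 ≠ p.1) ∧ x = tdeSorted2 q.1 p.1) →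
      (∀ x, x ∈ ND ↔ ∃ q ∈ pre, ∃ p ∈ m, ¬(q.2 = p.2 ∧ q.1 ≠ p.1) ∧ x = tdeSorted2 q.1 p.1) →
      t.foldl (fun acc p1 => m.foldl (tdeInner p1) acc) (D, ND)
        = (D ++ (tdeGo t).1, ND ++ (tdeGo t).2)
  | [], pre, D, ND, hm, hD, hND => by simp [tdeGo]
  | p1 :: t', pre, D, ND, hm, hD, hND => by
    have hkeys := tde_keys pre (p1 :: t') (by rw [← hm]; exact hnd)
    have hdisj := hkeys.1
    have hnd2 := hkeys.2
    rw [List.map_cons, List.nodup_cons] at hnd2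
    have hp1t' : p1.1 ∉ t'.map Prod.fst := hnd2.1
    have hndt' : (t'.map Prod.fst).Nodup := hnd2.2
    have hk : ∀ p2 ∈ t', p1.1 ≠ p2.1 :=
      fun p2 hp2 e => hp1t' (e ▸ List.mem_map_of_mem hp2)
    have hp1m : p1 ∈ m := by rw [hm]; simp
    have ht'm : ∀ p2 ∈ t', p2 ∈ m := fun p2 hp2 => by rw [hm]; simp [hp2]
    -- a pair built from two suffix keys is not yet present
    have hfresh : ∀ (a b : String × String), a = p1 ∨ a ∈ t' → b = p1 ∨ b ∈ t' →
        ∀ q ∈ pre, ∀ p ∈ m, tdeSorted2 a.1 b.1 ≠ tdeSorted2 q.1 p.1 := by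
      intro a b ha hb q hq p hp he
      rcases tdeSorted2_eq he with ⟨h1, _⟩ | ⟨_, h2⟩
      · rcases ha with rfl | ha
        · exact hdisj q hq a (by simp) h1.symm
        · exact hdisj q hq a (by simp [ha]) h1.symm
      · rcases hb with rfl | hb
        · exact hdisj q hq b (by simp) h2.symm
        · exact hdisj q hq b (by simp [hb]) h2.symm
    -- pass over pre: everything already present
    have hrowpre : pre.foldl (tdeInner p1) (D, ND) = (D, ND) := by
      apply tde_row_pre
      intro p2 hp2
      constructor
      · intro hc
        rw [tdeSorted2_symm]
        exact (hD _).mpr ⟨p2, hp2, p1, hp1m, tde_cond_symm hc, rfl⟩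
      · intro hc
        rw [tdeSorted2_symm]
        exact (hND _).mpr ⟨p2, hp2, p1, hp1m, tde_ncond_symm hc, rfl⟩
    -- the self pair
    have hself : tdeInner p1 (D, ND) p1 = (D, ND ++ [(p1.1, p1.1)]) := by
      have hc : ¬(p1.2 = p1.2 ∧ p1.1 ≠ p1.1) := by simp
      have hmem : (p1.1, p1.1) ∉ ND := by
        intro hmem
        obtain ⟨q, hq, p, hp, _, he⟩ := (hND _).mp hmem
        exact hfresh p1 p1 (Or.inl rfl) (Or.inl rfl) q hq p hp
          (by rw [tdeSorted2_self]; exact he)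
      unfold tdeInner
      rw [if_neg hc, tdeSorted2_self, PySem.Set.add_of_not_mem hmem]
    -- the row over the not-yet-processed suffix
    have hrowpost : t'.foldl (tdeInner p1) (D, ND ++ [(p1.1, p1.1)])
        = (D ++ (tdeRow p1.1 p1.2 t').1, (ND ++ [(p1.1, p1.1)]) ++ (tdeRow p1.1 p1.2 t').2) := by
      apply tde_row_post p1.1 p1.2 t' D (ND ++ [(p1.1, p1.1)]) hk
      · intro p2 hp2 _ hmem
        obtain ⟨q, hq, p, hp, _, he⟩ := (hD _).mp hmem
        exact hfresh p1 p2 (Or.inl rfl) (Or.inr hp2) q hq p hp he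
      · intro p2 hp2 _ hmem
        rcases List.mem_append.mp hmem with hmem | hmem
        · obtain ⟨q, hq, p, hp, _, he⟩ := (hND _).mp hmem
          exact hfresh p1 p2 (Or.inl rfl) (Or.inr hp2) q hq p hp he
        · rw [List.mem_singleton] at hmem
          have := tdeSorted2_eq (hmem.trans (tdeSorted2_self p1.1).symm)
          rcases this with ⟨_, h2⟩ | ⟨_, h2⟩ <;> exact hk p2 hp2 h2.symm
      · have : (t'.map (fun p2 => tdeSorted2 p1.1 p2.1))
            = (t'.map Prod.fst).map (fun a => tdeSorted2 p1.1 a) := by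
          rw [List.map_map]
          rfl
        rw [this]
        refine (List.nodup_map_iff_inj_on hndt').mpr ?_
        intro a ha b hb he
        rcases tdeSorted2_eq he with ⟨_, hab⟩ | ⟨_, hap⟩
        · exact hab
        · exact absurd (hap ▸ ha) hp1t'
    -- characterizations for the grown prefix
    have hm' : m = (pre ++ [p1]) ++ t' := by rw [hm]; simp
    have hD' : ∀ x, x ∈ D ++ (tdeRow p1.1 p1.2 t').1 ↔
        ∃ q ∈ pre ++ [p1], ∃ p ∈ m, (q.2 = p.2 ∧ q.1 ≠ p.1) ∧ x = tdeSorted2 q.1 p.1 := by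
      intro x
      rw [List.mem_append]
      constructor
      · rintro (hx | hx)
        · obtain ⟨q, hq, p, hp, hc, he⟩ := (hD _).mp hx
          exact ⟨q, by simp [hq], p, hp, hc, he⟩
        · obtain ⟨p2, hp2, hv, he⟩ := (tdeRow_mem1 p1.1 p1.2 t' x).mp hx
          exact ⟨p1, by simp, p2, ht'm p2 hp2, ⟨hv, hk p2 hp2⟩, he⟩
      · rintro ⟨q, hq, p, hp, hc, rfl⟩
        rcases List.mem_append.mp hq with hq | hq
        · exact Or.inl ((hD _).mpr ⟨q, hq, p, hp, hc, rfl⟩)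
        · rw [List.mem_singleton] at hq
          subst hq
          rw [hm] at hp
          rcases List.mem_append.mp hp with hp | hp
          · refine Or.inl ((hD _).mpr ⟨p, hp, q, hp1m, tde_cond_symm hc, tdeSorted2_symm _ _⟩)
          · rcases List.mem_cons.mp hp with rfl | hp
            · exact absurd rfl hc.2
            · exact Or.inr ((tdeRow_mem1 q.1 q.2 t' _).mpr ⟨p, hp, hc.1, rfl⟩)
    have hND' : ∀ x, x ∈ ND ++ ((p1.1, p1.1) :: (tdeRow p1.1 p1.2 t').2) ↔
        ∃ q ∈ pre ++ [p1], ∃ p ∈ m, ¬(q.2 = p.2 ∧ q.1 ≠ p.1) ∧ x = tdeSorted2 q.1 p.1 := by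
      intro x
      rw [List.mem_append, List.mem_cons]
      constructor
      · rintro (hx | hx | hx)
        · obtain ⟨q, hq, p, hp, hc, he⟩ := (hND _).mp hx
          exact ⟨q, by simp [hq], p, hp, hc, he⟩
        · exact ⟨p1, by simp, p1, hp1m, by simp, by rw [hx, tdeSorted2_self]⟩
        · obtain ⟨p2, hp2, hv, he⟩ := (tdeRow_mem2 p1.1 p1.2 t' x).mp hx
          exact ⟨p1, by simp, p2, ht'm p2 hp2, fun hc => hv hc.1, he⟩
      · rintro ⟨q, hq, p, hp, hc, rfl⟩
        rcases List.mem_append.mp hq with hq | hq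
        · exact Or.inl ((hND _).mpr ⟨q, hq, p, hp, hc, rfl⟩)
        · rw [List.mem_singleton] at hq
          subst hq
          rw [hm] at hp
          rcases List.mem_append.mp hp with hp | hp
          · exact Or.inl ((hND _).mpr ⟨p, hp, q, hp1m, tde_ncond_symm hc, tdeSorted2_symm _ _⟩)
          · rcases List.mem_cons.mp hp with rfl | hp
            · exact Or.inr (Or.inl (tdeSorted2_self _))
            · refine Or.inr (Or.inr ((tdeRow_mem2 q.1 q.2 t' _).mpr ⟨p, hp, ?_, rfl⟩))
              exact fun hv => hc ⟨hv, hk p hp⟩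
    -- assemble the step and recurse
    have hrow : m.foldl (tdeInner p1) (D, ND)
        = (D ++ (tdeRow p1.1 p1.2 t').1, ND ++ ((p1.1, p1.1) :: (tdeRow p1.1 p1.2 t').2)) := by
      rw [hm, List.foldl_append, hrowpre, List.foldl_cons, hself, hrowpost, List.append_assoc]
      rfl
    rw [List.foldl_cons, hrow,
      tde_main m hnd t' (pre ++ [p1]) _ _ hm' hD' hND']
    simp [tdeGo, List.append_assoc]

-- A's accumulators stay duplicate-free (they are Python sets)
theorem tde_inner_nodup (p1 : String × String) :
    ∀ (l : List (String × String)) (acc : PySem.Set (String × String) × PySem.Set (String × String)),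
      acc.1.Nodup → acc.2.Nodup →
      ((l.foldl (tdeInner p1) acc).1.Nodup ∧ (l.foldl (tdeInner p1) acc).2.Nodup)
  | [], acc, h1, h2 => ⟨h1, h2⟩
  | p2 :: l, acc, h1, h2 => by
    rw [List.foldl_cons]
    by_cases hc : p1.2 = p2.2 ∧ p1.1 ≠ p2.1
    · have hs : tdeInner p1 acc p2 = (PySem.Set.add acc.1 (tdeSorted2 p1.1 p2.1), acc.2) := by
        simp [tdeInner, hc]
      rw [hs]
      exact tde_inner_nodup p1 l _ (PySem.Set.nodup_add _ _ h1) h2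
    · have hs : tdeInner p1 acc p2 = (acc.1, PySem.Set.add acc.2 (tdeSorted2 p1.1 p2.1)) := by
        simp [tdeInner, hc]
      rw [hs]
      exact tde_inner_nodup p1 l _ h1 (PySem.Set.nodup_add _ _ h2)

theorem tde_outer_nodup (m : List (String × String)) :
    ∀ (l : List (String × String)) (acc : PySem.Set (String × String) × PySem.Set (String × String)),
      acc.1.Nodup → acc.2.Nodup →
      ((l.foldl (fun acc p1 => m.foldl (tdeInner p1) acc) acc).1.Nodup ∧
       (l.foldl (fun acc p1 => m.foldl (tdeInner p1) acc) acc).2.Nodup)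
  | [], acc, h1, h2 => ⟨h1, h2⟩
  | p1 :: l, acc, h1, h2 => by
    rw [List.foldl_cons]
    have h := tde_inner_nodup p1 m acc h1 h2
    exact tde_outer_nodup m l _ h.1 h.2

theorem tde_A_nodup (m : List (String × String)) :
    (true_duplicate_extraction m).1.Nodup ∧ (true_duplicate_extraction m).2.Nodup := by
  unfold true_duplicate_extraction
  exact tde_outer_nodup m m (PySem.Set.empty, PySem.Set.empty) List.nodup_nil List.nodup_nil

-- ===== VERDICT (by name: the statement is the Claim_ definition above) =====
theorem tde_A_eq_go (m : List (String × String))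
    (hnd : (m.map Prod.fst).Nodup) : true_duplicate_extraction m = tdeGo m := by
  unfold true_duplicate_extraction
  have h := tde_main m hnd m [] [] [] rfl (by simp) (by simp)
  simpa [PySem.Set.empty] using h

theorem true_duplicate_extraction_spec : Claim_equal_true_duplicate_extraction := by
  intro m _ hpre
  unfold Spec_true_duplicate_extraction true_duplicate_extraction_alt
  have hgo := tde_A_eq_go m hpre
  have hnd := tde_A_nodup m
  rw [← hgo]
  show true_duplicate_extraction m
      = (PySem.Set.ofList (true_duplicate_extraction m).1,
         PySem.Set.ofList (true_duplicate_extraction m).2)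
  rw [PySem.Set.ofList_eq_self_of_nodup _ hnd.1,
    PySem.Set.ofList_eq_self_of_nodup _ hnd.2]
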